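-- pv_equiv track=rewrite | github.com/ucscGenomeBrowser/kent | src/tagStorm/python/tagStorm.py | findSelectedFields
-- ===== SOURCE A (Python) =====
-- def findSelectedFields(fieldSearchList, fieldNames):
--     """ fieldSearchList is a list of fields, potentially with wild cards. fieldNames is the
--     real list of field names. Returns a list of all fields that match the SearchList.
--     """
--     prefixes = []
--     exactMatches = []
--     for f in fieldSearchList:
--         if f.endswith("*"):
--             prefixes.append(f.rstrip("*"))
--         else:
--             exactMatches.append(f)
--
--     fieldsShown = []
--     for f in fieldNames:
--         if f in exactMatches:
--             fieldsShown.append(f)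
--             continue
--
--         for pf in prefixes:
--             if f.startswith(pf):
--                 fieldsShown.append(f)
--                 break
--     return fieldsShown
-- ===== SOURCE B (Python) =====
-- def findSelectedFields(fieldSearchList, fieldNames):
--     """ fieldSearchList is a list of fields, potentially with wild cards. fieldNames is the
--     real list of field names. Returns a list of all fields that match the SearchList.
--     """
--     # Pattern-major pass: each pattern contributes the names it matches to one set,
--     # then a single membership filter over fieldNames restores the original order.
--     matched = set()
--     for pat in fieldSearchList:
--         if pat.endswith("*"):
--             p = pat.rstrip("*")
--             matched.update(f for f in fieldNames if f.startswith(p))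
--         else:
--             matched.add(pat)
--     return [f for f in fieldNames if f in matched]
-- ===== Notes on version B (the rewrite author's own statement) =====
-- stated objective: faster
-- what changed: Inverts the loop nesting: instead of classifying patterns and then scanning the pattern lists per field, B iterates pattern-major, accumulating into one set the names each pattern matches (the pattern itself for exact patterns, the startswith hits over fieldNames for prefix patterns), and finishes with a single hashed-membership filter over fieldNames.
import Mathlib
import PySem

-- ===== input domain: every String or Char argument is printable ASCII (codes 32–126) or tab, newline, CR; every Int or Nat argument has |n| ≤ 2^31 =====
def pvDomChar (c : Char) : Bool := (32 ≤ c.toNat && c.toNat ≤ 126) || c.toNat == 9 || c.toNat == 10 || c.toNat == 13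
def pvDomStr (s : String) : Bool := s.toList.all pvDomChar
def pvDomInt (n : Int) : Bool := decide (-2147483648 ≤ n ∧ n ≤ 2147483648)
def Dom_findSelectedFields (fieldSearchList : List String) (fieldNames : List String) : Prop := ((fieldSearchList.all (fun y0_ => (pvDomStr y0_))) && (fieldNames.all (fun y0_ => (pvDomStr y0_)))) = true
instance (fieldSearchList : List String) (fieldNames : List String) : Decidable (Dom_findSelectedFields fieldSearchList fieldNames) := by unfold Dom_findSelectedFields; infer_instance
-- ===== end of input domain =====

-- B inverts A's loop nesting: pattern-major accumulation of all matched names into one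
-- set, then a single membership filter over fieldNames (alternative; same results).

-- ===== PORT A =====
-- f.rstrip("*"): drop the trailing run of '*' characters (exact: rstrip with an explicit
-- char set only removes those chars from the right end).
def pvRstripStar (s : String) : String :=
  String.ofList ((s.toList.reverse.dropWhile (fun c => c == '*')).reverse)

-- the inner 'for pf in prefixes: if f.startswith(pf): append(f); break'
def pvInnerA (f : String) : List String → List String → List String
  | [], acc => acc
  | pf :: rest, acc =>
      if PySem.Str.startswith f pf then acc ++ [f] else pvInnerA f rest acc

def findSelectedFields (fieldSearchList : List String) (fieldNames : List String) : List String :=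
  let pe := fieldSearchList.foldl (fun (s : List String × List String) f =>
      if PySem.Str.endswith f "*" then (s.1 ++ [pvRstripStar f], s.2)
      else (s.1, s.2 ++ [f])) ([], [])
  fieldNames.foldl (fun acc f =>
      if pe.2.contains f then acc ++ [f]
      else pvInnerA f pe.1 acc) []

-- ===== PORT B =====
def findSelectedFields_alt (fieldSearchList : List String) (fieldNames : List String) : List String :=
  let matched := fieldSearchList.foldl (fun (m : PySem.Set String) pat =>
      if PySem.Str.endswith pat "*" then
        PySem.Set.update m (fieldNames.filter (fun f => PySem.Str.startswith f (pvRstripStar pat)))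
      else PySem.Set.add m pat) PySem.Set.empty
  fieldNames.filter (fun f => PySem.Set.contains matched f)

-- ===== PRECONDITION & SPEC =====
def Spec_findSelectedFields (fieldSearchList : List String) (fieldNames : List String) (out : List String) : Prop := out = findSelectedFields_alt fieldSearchList fieldNames
instance (fieldSearchList : List String) (fieldNames : List String) (out : List String) : Decidable (Spec_findSelectedFields fieldSearchList fieldNames out) := by unfold Spec_findSelectedFields; infer_instance

-- ===== CLAIM (what is proved, stated in full; the proofs are below) =====
def Claim_equal_findSelectedFields : Prop := ∀ (fieldSearchList : List String) (fieldNames : List String), Dom_findSelectedFields fieldSearchList fieldNames → Spec_findSelectedFields fieldSearchList fieldNames (findSelectedFields fieldSearchList fieldNames)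

-- ===== LEMMAS AND PROOFS =====

theorem pvSplitLoop (l p e : List String) :
    l.foldl (fun (s : List String × List String) f =>
      if PySem.Str.endswith f "*" then (s.1 ++ [pvRstripStar f], s.2)
      else (s.1, s.2 ++ [f])) (p, e)
    = (p ++ (l.filter (fun f => PySem.Str.endswith f "*")).map pvRstripStar,
       e ++ l.filter (fun f => ! PySem.Str.endswith f "*")) := by
  induction l generalizing p e with
  | nil => simp
  | cons x xs ih =>
      simp only [List.foldl_cons, List.filter_cons]
      by_cases h : PySem.Str.endswith x "*" = true
      · rw [if_pos h, ih]
        have h' : PySem.Chars.endswith x.toList ['*'] = true := by simpa using h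
        simp [h']
      · rw [if_neg h, ih]
        have h' : PySem.Chars.endswith x.toList ['*'] = false := by simpa using h
        simp [h']

theorem pvInnerA_eq (f : String) (ps acc : List String) :
    pvInnerA f ps acc = if ps.any (fun p => PySem.Str.startswith f p) then acc ++ [f] else acc := by
  induction ps with
  | nil => simp [pvInnerA]
  | cons p rest ih =>
      simp only [pvInnerA, ih, List.any_cons]
      by_cases h : PySem.Str.startswith f p = true
      · rw [if_pos h, if_pos (by rw [h]; rfl)]
      · have h' : PySem.Str.startswith f p = false := by
          cases hb : PySem.Str.startswith f p
          · rfl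
          · exact absurd hb h
        rw [if_neg h]
        simp only [h', Bool.false_or]

theorem pvIfOrBool {α : Type} (A B : Bool) (x y : α) :
    (if A = true then x else if B = true then x else y) = if (A || B) = true then x else y := by
  cases A <;> cases B <;> simp

-- membership in B's accumulated set, for a name f that occurs in fieldNames
theorem pvMemMatched (fn : List String) (f : String) (hf : f ∈ fn) (l : List String)
    (m : PySem.Set String) :
    (f ∈ l.foldl (fun (m : PySem.Set String) pat =>
        if PySem.Str.endswith pat "*" then
          PySem.Set.update m (fn.filter (fun g => PySem.Str.startswith g (pvRstripStar pat)))
        else PySem.Set.add m pat) m)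
    ↔ (f ∈ m ∨ (l.any (fun pat =>
        if PySem.Str.endswith pat "*" then PySem.Str.startswith f (pvRstripStar pat)
        else pat == f)) = true) := by
  induction l generalizing m with
  | nil => simp
  | cons pat rest ih =>
      simp only [List.foldl_cons, List.any_cons]
      by_cases h : PySem.Str.endswith pat "*" = true
      · rw [if_pos h, ih, PySem.Set.mem_update, List.mem_filter]
        simp only [if_pos h, Bool.or_eq_true]
        constructor
        · rintro (⟨hm | ⟨_, hs⟩⟩ | hr)
          exacts [Or.inl hm, Or.inr (Or.inl hs), Or.inr (Or.inr hr)]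
        · rintro (hm | hs | hr)
          exacts [Or.inl (Or.inl hm), Or.inl (Or.inr ⟨hf, hs⟩), Or.inr hr]
      · rw [if_neg h, ih, PySem.Set.mem_add]
        simp only [if_neg h, Bool.or_eq_true, beq_iff_eq]
        constructor
        · rintro (⟨hm | he⟩ | hr)
          exacts [Or.inl hm, Or.inr (Or.inl he.symm), Or.inr (Or.inr hr)]
        · rintro (hm | he | hr)
          exacts [Or.inl (Or.inl hm), Or.inl (Or.inr he.symm), Or.inr hr]

-- bool shuffle used by pvPredEq
theorem pvOrShuffle (C S R : Bool) : (C || (S || R)) = (S || (C || R)) := by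
  cases C <;> cases S <;> cases R <;> rfl

-- A's per-field predicate equals B's pattern-major predicate
theorem pvPredEq (l : List String) (f : String) :
    ((l.filter (fun g => ! PySem.Str.endswith g "*")).contains f
      || ((l.filter (fun g => PySem.Str.endswith g "*")).map pvRstripStar).any
          (fun p => PySem.Str.startswith f p))
    = l.any (fun pat =>
        if PySem.Str.endswith pat "*" then PySem.Str.startswith f (pvRstripStar pat)
        else pat == f) := by
  induction l with
  | nil => simp
  | cons pat rest ih =>
      simp only [List.filter_cons, List.any_cons]
      by_cases h : PySem.Str.endswith pat "*" = true
      · rw [if_neg (show ¬((! PySem.Str.endswith pat "*") = true) by rw [h]; simp),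
            if_pos h, List.map_cons, List.any_cons, if_pos h, ← ih, pvOrShuffle]
      · have hF : PySem.Str.endswith pat "*" = false := Bool.eq_false_iff.2 h
        rw [if_pos (show (! PySem.Str.endswith pat "*") = true by rw [hF]; rfl),
            if_neg h, if_neg h, ← ih]
        simp only [List.contains_cons, Bool.or_assoc]
        by_cases he : f = pat
        · subst he; rfl
        · rw [beq_eq_false_iff_ne.2 he, beq_eq_false_iff_ne.2 (Ne.symm he)]

-- ===== VERDICT (by name: the statement is the Claim_ definition above) =====
theorem findSelectedFields_spec : Claim_equal_findSelectedFields := by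
  intro fsl fn _
  show findSelectedFields fsl fn = findSelectedFields_alt fsl fn
  unfold findSelectedFields findSelectedFields_alt
  rw [pvSplitLoop]
  simp only [List.nil_append, pvInnerA_eq]
  rw [show (fun (acc : List String) f =>
        if (fsl.filter (fun f => ! PySem.Str.endswith f "*")).contains f then acc ++ [f]
        else if ((fsl.filter (fun f => PySem.Str.endswith f "*")).map pvRstripStar).any
            (fun p => PySem.Str.startswith f p) then acc ++ [f] else acc)
      = (fun acc f =>
        if ((fsl.filter (fun f => ! PySem.Str.endswith f "*")).contains f
            || ((fsl.filter (fun f => PySem.Str.endswith f "*")).map pvRstripStar).any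
              (fun p => PySem.Str.startswith f p)) then acc ++ [f] else acc) from by
      funext acc f
      exact pvIfOrBool _ _ _ _]
  rw [PySem.List.foldl_append_if_eq_filter]
  apply List.filter_congr
  intro f hf
  rw [pvPredEq]
  cases hb : fsl.any (fun pat =>
      if PySem.Str.endswith pat "*" then PySem.Str.startswith f (pvRstripStar pat)
      else pat == f)
  · symm
    apply Bool.eq_false_iff.2
    intro hc
    rcases (pvMemMatched fn f hf fsl PySem.Set.empty).1
        ((PySem.Set.contains_iff _ _).1 hc) with hm | hany
    · simp [PySem.Set.empty] at hm
    · rw [hb] at hany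
      exact absurd hany (by decide)
  · symm
    exact (PySem.Set.contains_iff _ _).2
      ((pvMemMatched fn f hf fsl PySem.Set.empty).2 (Or.inr hb))
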